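-- pv_equiv track=rewrite | github.com/pxjacomex/sedc_v1 | sedc/anuarios/formatoII.py | maximospre
-- ===== SOURCE A (Python) =====
-- def maximospre(datos_diarios):
--     # retorna maxima precipitacion mensual y en que dia sucedio y cuantos dias hubo precipitacion
--     max24H = []
--     maxdia = []
--     totdias= []
--
--     for i in range(1,13):
--         val_max24h=[]
--         val_maxdia = []
--         val_totdias= []
--         for fila in datos_diarios:
--             if fila.get('month') == i:
--                 val_max24h.append(fila.get('valor'))
--                 val_maxdia.append(fila.get('day'))
--         #contar dias con lluvia en la variable count
--         count = 0
--         for j in val_max24h: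
--             if(j>0):
--                 count+=1
--         if len(val_max24h)>0:
--             max24H.append(max(val_max24h))
--             maxdia.append(val_maxdia[val_max24h.index(max(val_max24h))])
--         else:
--             max24H.append(0)
--             maxdia.append(0)
--         totdias.append(count)
--     return max24H,maxdia,totdias
-- ===== SOURCE B (Python) =====
-- def _stats(grupo):
--     # grupo: list of (valor, day) pairs for one month, in original order
--     tot = sum(1 for v, _ in grupo if v > 0)
--     if not grupo:
--         return (0, 0, tot)
--     vmax = max(v for v, _ in grupo)
--     dia = next(d for v, d in grupo if v == vmax)
--     return (vmax, dia, tot)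
--
-- def maximospre(datos_diarios):
--     pares = [(f.get('month'), (f.get('valor'), f.get('day')))
--              for f in datos_diarios if f.get('month') is not None]
--     idx = {}
--     for m, vd in pares:
--         idx.setdefault(m, []).append(vd)
--     triples = [_stats(idx.get(i, [])) for i in range(1, 13)]
--     return [t[0] for t in triples], [t[1] for t in triples], [t[2] for t in triples]
-- ===== Notes on version B (the rewrite author's own statement) =====
-- stated objective: alternative
-- what changed: B replaces A's 12 independent full scans of datos_diarios (plus a repeated max and a list.index rescan per month) by one grouping pass building a month->rows index, then a per-month stats pass that finds the day of the max with a single first-match scan over the group.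
-- outside the precondition, e.g. on maximospre([{'month': 1, 'day': 3}]): A raises TypeError, B raises TypeError
import Mathlib
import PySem

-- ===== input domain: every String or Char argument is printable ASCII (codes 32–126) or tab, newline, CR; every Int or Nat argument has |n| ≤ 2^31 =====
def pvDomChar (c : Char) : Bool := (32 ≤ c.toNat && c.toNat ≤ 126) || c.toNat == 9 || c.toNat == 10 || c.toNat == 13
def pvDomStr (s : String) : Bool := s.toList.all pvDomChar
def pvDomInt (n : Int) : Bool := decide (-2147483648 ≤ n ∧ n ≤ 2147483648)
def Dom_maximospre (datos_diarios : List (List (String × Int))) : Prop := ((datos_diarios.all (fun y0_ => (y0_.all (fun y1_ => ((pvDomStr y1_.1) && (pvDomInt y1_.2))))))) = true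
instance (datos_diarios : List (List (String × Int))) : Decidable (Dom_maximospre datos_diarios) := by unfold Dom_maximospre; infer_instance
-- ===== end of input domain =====

-- B builds a month→rows index in one grouping pass and computes each month's stats from its group
-- (first-match scan for the max's day) instead of A's 12 full scans with repeated max and list.index rescans
-- (an alternative decomposition; return value proved equal on Pre_).

-- ===== PORT A =====
def maximospre (datos_diarios : List (List (String × Int))) : List Int × List Int × List Int :=
  (PySem.List.pyRange 1 13 1).foldl (fun acc i =>
    -- inner loop: collect valor and day of the rows of month i
    let vd := datos_diarios.foldl (fun (s : List Int × List Int) fila =>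
      if (PySem.Dict.mk fila).get? "month" = some i then
        (s.1 ++ [(PySem.Dict.mk fila).getD "valor" 0], s.2 ++ [(PySem.Dict.mk fila).getD "day" 0])
      else s) ([], [])
    -- count days with rain
    let count := vd.1.foldl (fun c j => if 0 < j then c + 1 else c) (0 : Int)
    if vd.1.length > 0 then
      let m := (PySem.List.max? vd.1 (fun y => y)).getD 0
      -- val_maxdia[val_max24h.index(max(val_max24h))]; index/get guarded (in range: m ∈ vd.1)
      let dia := (PySem.List.pyGet? vd.2 (((PySem.List.index? vd.1 m).getD 0 : Nat) : Int)).getD 0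
      (acc.1 ++ [m], acc.2.1 ++ [dia], acc.2.2 ++ [count])
    else
      (acc.1 ++ [(0 : Int)], acc.2.1 ++ [(0 : Int)], acc.2.2 ++ [count])
    ) ([], [], [])

-- ===== PORT B =====
-- _stats of Source B: (max valor, day of its first occurrence, rainy-day count) of one month's group
def pvStats (grupo : List (Int × Int)) : Int × Int × Int :=
  let tot : Int := (grupo.countP (fun p => decide (0 < p.1)) : Int)
  match grupo with
  | [] => (0, 0, tot)
  | _ :: _ =>
    let vmax := (PySem.List.max? (grupo.map Prod.fst) (fun y => y)).getD 0
    let dia := ((grupo.find? (fun p => p.1 == vmax)).map Prod.snd).getD 0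
    (vmax, dia, tot)

def maximospre_alt (datos_diarios : List (List (String × Int))) : List Int × List Int × List Int :=
  let pares := datos_diarios.filterMap (fun f =>
    ((PySem.Dict.mk f).get? "month").map (fun m =>
      (m, ((PySem.Dict.mk f).getD "valor" 0, (PySem.Dict.mk f).getD "day" 0))))
  let idx := pares.foldl (fun d p => d.modify p.1 [] (· ++ [p.2])) PySem.Dict.empty
  let triples := (PySem.List.pyRange 1 13 1).map (fun i => pvStats (idx.getD i []))
  (triples.map (·.1), triples.map (·.2.1), triples.map (·.2.2))

-- ===== PRECONDITION & SPEC =====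
-- Pre_ excludes rows whose month is in 1..12 but which lack the 'valor' or the 'day' key:
-- there Python A raises TypeError (None > 0) resp. returns None inside a list of ints (not an Int).
def Pre_maximospre (datos_diarios : List (List (String × Int))) : Prop :=
  (datos_diarios.all (fun fila =>
    ((PySem.Dict.mk fila).get? "month").all (fun m =>
      !(1 ≤ m && m ≤ 12) ||
        (((PySem.Dict.mk fila).get? "valor").isSome && ((PySem.Dict.mk fila).get? "day").isSome)))) = true
instance (datos_diarios : List (List (String × Int))) : Decidable (Pre_maximospre datos_diarios) := by
  unfold Pre_maximospre; infer_instance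

def pvWitness_maximospre : (List (List (String × Int))) :=
  [[("month", 2), ("valor", 7), ("day", 15)], [("month", 2), ("valor", 0), ("day", 16)]]

def Spec_maximospre (datos_diarios : List (List (String × Int))) (out : List Int × List Int × List Int) : Prop := out = maximospre_alt datos_diarios
instance (datos_diarios : List (List (String × Int))) (out : List Int × List Int × List Int) : Decidable (Spec_maximospre datos_diarios out) := by unfold Spec_maximospre; infer_instance

-- ===== CLAIM (what is proved, stated in full; the proofs are below) =====
def Claim_equal_maximospre : Prop := ∀ (datos_diarios : List (List (String × Int))), Dom_maximospre datos_diarios → Pre_maximospre datos_diarios → Spec_maximospre datos_diarios (maximospre datos_diarios)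

-- ===== LEMMAS AND PROOFS =====
def pvKey (fila : List (String × Int)) : Option Int := (PySem.Dict.mk fila).get? "month"
def pvVD (fila : List (String × Int)) : Int × Int :=
  ((PySem.Dict.mk fila).getD "valor" 0, (PySem.Dict.mk fila).getD "day" 0)
def pvRows (i : Int) (datos : List (List (String × Int))) : List (Int × Int) :=
  (datos.filter (fun f => pvKey f == some i)).map pvVD

theorem pv_innerA (i : Int) (datos : List (List (String × Int))) :
    ∀ acc : List Int × List Int,
      datos.foldl (fun (s : List Int × List Int) fila =>
        if (PySem.Dict.mk fila).get? "month" = some i then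
          (s.1 ++ [(PySem.Dict.mk fila).getD "valor" 0], s.2 ++ [(PySem.Dict.mk fila).getD "day" 0])
        else s) acc
      = (acc.1 ++ (pvRows i datos).map Prod.fst, acc.2 ++ (pvRows i datos).map Prod.snd) := by
  induction datos with
  | nil => intro acc; simp [pvRows]
  | cons f t ih =>
    intro acc
    by_cases h : (PySem.Dict.mk f).get? "month" = some i
    · simp [List.foldl_cons, h, ih, pvRows, pvKey, pvVD]
    · simp [List.foldl_cons, h, ih, pvRows, pvKey]

theorem pv_groupB (i : Int) (datos : List (List (String × Int))) :
    ((datos.filterMap (fun f =>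
        ((PySem.Dict.mk f).get? "month").map (fun m =>
          (m, ((PySem.Dict.mk f).getD "valor" 0, (PySem.Dict.mk f).getD "day" 0))))).foldl
      (fun d p => d.modify p.1 [] (· ++ [p.2])) PySem.Dict.empty).getD i []
    = pvRows i datos := by
  rw [PySem.Dict.getD_foldl_modify_append]
  simp only [PySem.Dict.getD_empty, List.nil_append]
  induction datos with
  | nil => simp [pvRows]
  | cons f t ih =>
    cases h : (PySem.Dict.mk f).get? "month" with
    | none => simp [h, ih, pvRows, pvKey]
    | some m =>
      by_cases hm : m = i
      · subst hm; simp [h, ih, pvRows, pvKey, pvVD]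
      · simp [h, hm, ih, pvRows, pvKey]

theorem pv_dia (rows : List (Int × Int)) (m : Int) (hm : m ∈ rows.map Prod.fst) :
    (PySem.List.pyGet? (rows.map Prod.snd) (((PySem.List.index? (rows.map Prod.fst) m).getD 0 : Nat) : Int)).getD 0
    = ((rows.find? (fun p => p.1 == m)).map Prod.snd).getD 0 := by
  induction rows with
  | nil => simp at hm
  | cons p t ih =>
    rw [List.map_cons, List.map_cons]
    by_cases h : p.1 = m
    · rw [h, PySem.List.index?_cons_self]
      simp [h]
    · have hm' : m ∈ t.map Prod.fst := by
        have := List.mem_cons.mp (by rw [List.map_cons] at hm; exact hm)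
        rcases this with h1 | h1
        · exact absurd h1.symm h
        · exact h1
      obtain ⟨k, hk⟩ := Option.isSome_iff_exists.mp ((PySem.List.index?_isSome_iff _ _).mpr hm')
      rw [PySem.List.index?_cons_of_ne _ h, hk]
      have hfind : List.find? (fun q => q.1 == m) (p :: t) = List.find? (fun q => q.1 == m) t := by
        simp [h]
      rw [hfind, ← ih hm', hk]
      simp [PySem.List.pyGet?_natCast]

theorem pv_count (rows : List (Int × Int)) :
    (rows.map Prod.fst).foldl (fun c j => if 0 < j then c + 1 else c) (0 : Int)
    = (rows.countP (fun p => decide (0 < p.1)) : Int) := by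
  rw [show (fun (c : Int) (j : Int) => if 0 < j then c + 1 else c)
        = (fun (c : Int) (j : Int) => if decide (0 < j) = true then c + 1 else c) from by
      funext c j; simp]
  rw [PySem.List.foldl_count_if]
  simp [List.countP_map, Function.comp_def]

theorem pv_foldl3 (L : List Int) (g : Int → Int × Int × Int) :
    ∀ (a b c : List Int),
      L.foldl (fun acc i => (acc.1 ++ [(g i).1], acc.2.1 ++ [(g i).2.1], acc.2.2 ++ [(g i).2.2])) (a, b, c)
      = (a ++ L.map (fun i => (g i).1), b ++ L.map (fun i => (g i).2.1), c ++ L.map (fun i => (g i).2.2)) := by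
  induction L with
  | nil => simp
  | cons x t ih => intro a b c; simp [List.foldl_cons, ih]

theorem pv_A_eq (datos : List (List (String × Int))) :
    maximospre datos
      = ((PySem.List.pyRange 1 13 1).map (fun i => (pvStats (pvRows i datos)).1),
         (PySem.List.pyRange 1 13 1).map (fun i => (pvStats (pvRows i datos)).2.1),
         (PySem.List.pyRange 1 13 1).map (fun i => (pvStats (pvRows i datos)).2.2)) := by
  unfold maximospre
  rw [PySem.List.foldl_congr_mem _ _
      (fun acc i => (acc.1 ++ [(pvStats (pvRows i datos)).1],
                     acc.2.1 ++ [(pvStats (pvRows i datos)).2.1],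
                     acc.2.2 ++ [(pvStats (pvRows i datos)).2.2])) _ ?_]
  · exact pv_foldl3 _ _ [] [] []
  · intro acc i _
    simp only [pv_innerA i datos ([], []), List.nil_append]
    cases hrows : pvRows i datos with
    | nil => simp [pvStats]
    | cons r rs =>
      simp only [List.map_cons]
      obtain ⟨m0, hmax⟩ : ∃ m0, PySem.List.max? (r.1 :: rs.map Prod.fst) (fun y => y) = some m0 := by
        cases hx : PySem.List.max? (r.1 :: rs.map Prod.fst) (fun y => y) with
        | none => exact absurd ((PySem.List.max?_eq_none_iff _ _).mp hx) (by simp)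
        | some v => exact ⟨v, rfl⟩
      have hmem : m0 ∈ (r :: rs).map Prod.fst := by
        simpa using PySem.List.max?_mem hmax
      have hdia := pv_dia (r :: rs) m0 hmem
      simp only [List.map_cons] at hdia
      simp only [List.length_cons, pvStats, hmax, Option.getD_some]
      rw [if_pos (by omega)]
      have hcount := pv_count (r :: rs)
      simp only [List.map_cons] at hcount
      simp only [PySem.List.index?_eq_idxOf?, PySem.List.pyGet?_natCast] at hdia
      simp [hmax, hcount, hdia]

theorem pv_B_eq (datos : List (List (String × Int))) :
    maximospre_alt datos
      = ((PySem.List.pyRange 1 13 1).map (fun i => (pvStats (pvRows i datos)).1),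
         (PySem.List.pyRange 1 13 1).map (fun i => (pvStats (pvRows i datos)).2.1),
         (PySem.List.pyRange 1 13 1).map (fun i => (pvStats (pvRows i datos)).2.2)) := by
  unfold maximospre_alt
  simp only [pv_groupB, List.map_map]
  rfl

theorem pv_main (datos : List (List (String × Int))) : maximospre datos = maximospre_alt datos := by
  rw [pv_A_eq, pv_B_eq]

-- ===== VERDICT (by name: the statement is the Claim_ definition above) =====
theorem maximospre_spec : Claim_equal_maximospre := by
  intro datos _ _
  unfold Spec_maximospre
  exact pv_main datos
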